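-- pv_equiv track=rewrite | github.com/cms02snu/Algorithm | baekjoon/12026.py | solution
-- ===== SOURCE A (Python) =====
-- def solution(n,temp):
--     data = []
--     for a in temp:
--         if a=='B':
--             data.append(0)
--         elif a=='O':
--             data.append(1)
--         else:
--             data.append(2)
--
--     table = [0] * n
--
--     for i in range(1,n):
--         _min = int(1e9)
--         for j in range(i):
--             if data[j]==(data[i]-1)%3 and table[j]!=-1:
--                 k = table[j] + (i-j)*(i-j)
--                 _min = min(_min,k)
--         if _min==int(1e9):
--             table[i] = -1
--         else:
--             table[i] = _min
--
--     return table[n-1]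
-- ===== SOURCE B (Python) =====
-- def solution(n, temp):
--     INF = 10 ** 9
--     data = [0 if c == 'B' else 1 if c == 'O' else 2 for c in temp[:n]]
--     table = [0] * n
--     # buckets[c]: indices j (ascending) with data[j] == c and table[j] != -1
--     buckets = ([], [], [])
--     for i in range(1, n):
--         j0 = i - 1
--         if table[j0] != -1:
--             buckets[data[j0]].append(j0)
--         need = (data[i] - 1) % 3
--         best = INF
--         for j in reversed(buckets[need]):
--             d = i - j
--             if d * d >= best:
--                 break
--             c = table[j] + d * d
--             if c < best:
--                 best = c
--         table[i] = best if best < INF else -1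
--     return table[n - 1]
-- ===== Notes on version B (the rewrite author's own statement) =====
-- stated objective: faster
-- what changed: B indexes predecessors by color (three bucket lists of usable j with table[j] != -1) and scans only the matching-color bucket in descending j with an early break once (i-j)^2 reaches the current best, instead of A's full rescan of all j < i with a per-j modulo test.
import Mathlib
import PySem

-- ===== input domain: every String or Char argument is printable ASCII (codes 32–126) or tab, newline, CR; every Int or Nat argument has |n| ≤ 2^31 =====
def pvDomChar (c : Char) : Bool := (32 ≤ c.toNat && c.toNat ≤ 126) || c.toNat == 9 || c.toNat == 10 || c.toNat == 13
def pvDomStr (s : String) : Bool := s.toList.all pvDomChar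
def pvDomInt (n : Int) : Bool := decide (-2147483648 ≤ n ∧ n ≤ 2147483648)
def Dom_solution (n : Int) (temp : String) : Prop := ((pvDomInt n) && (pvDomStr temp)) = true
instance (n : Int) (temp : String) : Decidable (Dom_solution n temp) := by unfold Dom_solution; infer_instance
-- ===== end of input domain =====

-- B keeps, per color, the list of usable predecessors j (table[j] != -1) and scans only
-- the matching-color list, descending, breaking once (i-j)^2 reaches the current best
-- (exact: usable table[j] are nonnegative); A rescans all j < i every time.

-- ===== PORT A =====
-- char -> 0/1/2 exactly as A's if/elif/else
def pvCode (a : Char) : Int := if a = 'B' then 0 else if a = 'O' then 1 else 2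

-- A's inner loop: _min over j in range(i)
def solAInner (data tbl : List Int) (i : Nat) : Int :=
  (List.range i).foldl (fun m j =>
    if data.getD j 0 = PySem.Int.mod (data.getD i 0 - 1) 3 ∧ tbl.getD j 0 ≠ -1 then
      min m (tbl.getD j 0 + ((i : Int) - (j : Int)) * ((i : Int) - (j : Int)))
    else m) (10 ^ 9)

-- A: table[0] = 0 and table[i] is assigned once, in increasing i, so the
-- in-place list is ported as a list grown by one entry per i.
def solution (n : Int) (temp : String) : Int :=
  let data := temp.toList.map pvCode
  let N := n.toNat
  let table := (List.range' 1 (N - 1)).foldl (fun tbl i =>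
      let m := solAInner data tbl i
      tbl ++ [if m = 10 ^ 9 then -1 else m]) [0]
  table.getD (N - 1) 0

-- ===== PORT B =====
-- B's conditional expression 0 if c=='B' else 1 if c=='O' else 2
def pvCodeB (c : Char) : Int := if c = 'B' then 0 else if c = 'O' then 1 else 2

-- buckets[c] for c = 0, 1, 2 (B's data values are always 0, 1 or 2)
def pvBGet (bs : List Nat × List Nat × List Nat) (c : Int) : List Nat :=
  if c = 0 then bs.1 else if c = 1 then bs.2.1 else bs.2.2

def pvBAdd (bs : List Nat × List Nat × List Nat) (c : Int) (j : Nat) :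
    List Nat × List Nat × List Nat :=
  if c = 0 then (bs.1 ++ [j], bs.2.1, bs.2.2)
  else if c = 1 then (bs.1, bs.2.1 ++ [j], bs.2.2)
  else (bs.1, bs.2.1, bs.2.2 ++ [j])

-- B's inner for-loop over reversed(buckets[need]) with the break
def bScanB (tbl : List Int) (i : Nat) : List Nat → Int → Int
  | [], best => best
  | j :: js, best =>
    let d : Int := (i : Int) - (j : Int)
    if best ≤ d * d then best
    else bScanB tbl i js
      (if tbl.getD j 0 + d * d < best then tbl.getD j 0 + d * d else best)

def solution_alt (n : Int) (temp : String) : Int :=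
  let N := n.toNat
  let data := (temp.toList.take N).map pvCodeB  -- temp[:n]; exact since Pre_ gives n ≥ 1
  let st := (List.range' 1 (N - 1)).foldl
    (fun (st : List Int × (List Nat × List Nat × List Nat)) i =>
      let tbl := st.1
      let bs := if tbl.getD (i - 1) 0 ≠ -1
        then pvBAdd st.2 (data.getD (i - 1) 0) (i - 1) else st.2
      let need := PySem.Int.mod (data.getD i 0 - 1) 3
      let best := bScanB tbl i (pvBGet bs need).reverse (10 ^ 9)
      (tbl ++ [if best < 10 ^ 9 then best else -1], bs)) ([0], ([], [], []))
  st.1.getD (N - 1) 0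

-- ===== PRECONDITION & SPEC =====
-- A raises IndexError when n ≤ 0 (table[n-1] on an empty table) and when
-- 2 ≤ n > len(temp) (data[i] out of range); Pre_ excludes exactly those inputs.
def Pre_solution (n : Int) (temp : String) : Prop :=
  1 ≤ n ∧ (n ≤ (temp.toList.length : Int) ∨ n = 1)
instance (n : Int) (temp : String) : Decidable (Pre_solution n temp) := by
  unfold Pre_solution; infer_instance

def pvWitness_solution : Int × String := (2, "BO")

def Spec_solution (n : Int) (temp : String) (out : Int) : Prop := out = solution_alt n temp
instance (n : Int) (temp : String) (out : Int) : Decidable (Spec_solution n temp out) := by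
  unfold Spec_solution; infer_instance

-- ===== CLAIM (what is proved, stated in full; the proofs are below) =====
def Claim_equal_solution : Prop := ∀ (n : Int) (temp : String), Dom_solution n temp → Pre_solution n temp → Spec_solution n temp (solution n temp)

-- ===== LEMMAS AND PROOFS =====

-- table invariant: every entry (and the getD default) is -1 or nonnegative
def pvInv (tbl : List Int) : Prop := ∀ j : Nat, tbl.getD j 0 = -1 ∨ 0 ≤ tbl.getD j 0

theorem pvInv_append (tbl : List Int) (v : Int) (h : pvInv tbl) (hv : v = -1 ∨ 0 ≤ v) :
    pvInv (tbl ++ [v]) := by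
  intro j
  rcases lt_trichotomy j tbl.length with hj | hj | hj
  · rw [List.getD_append _ _ _ _ hj]; exact h j
  · subst hj
    rw [List.getD_eq_getElem?_getD, List.getElem?_append_right (le_refl _)]
    simpa using hv
  · rw [List.getD_eq_getElem?_getD, List.getElem?_eq_none (by simp; omega)]
    right; rfl

theorem pvGetD_append_left (tbl : List Int) (v : Int) (j : Nat) (hj : j < tbl.length) :
    (tbl ++ [v]).getD j 0 = tbl.getD j 0 := List.getD_append _ _ _ _ hj

-- A's inner fold never exceeds its initial accumulator
theorem foldA_le (data tbl : List Int) (i : Nat) (L : List Nat) (b : Int) :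
    (L.foldl (fun m j =>
      if data.getD j 0 = PySem.Int.mod (data.getD i 0 - 1) 3 ∧ tbl.getD j 0 ≠ -1 then
        min m (tbl.getD j 0 + ((i : Int) - (j : Int)) * ((i : Int) - (j : Int)))
      else m) b) ≤ b := by
  induction L generalizing b with
  | nil => simp
  | cons j js ih =>
    simp only [List.foldl_cons]
    split
    · exact le_trans (ih _) (min_le_left _ _)
    · exact ih b

-- A's inner fold stays nonnegative under the table invariant
theorem foldA_nonneg (data tbl : List Int) (i : Nat) (hinv : pvInv tbl)
    (L : List Nat) (b : Int) (hb : 0 ≤ b) :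
    0 ≤ L.foldl (fun m j =>
      if data.getD j 0 = PySem.Int.mod (data.getD i 0 - 1) 3 ∧ tbl.getD j 0 ≠ -1 then
        min m (tbl.getD j 0 + ((i : Int) - (j : Int)) * ((i : Int) - (j : Int)))
      else m) b := by
  induction L generalizing b with
  | nil => simpa
  | cons j js ih =>
    simp only [List.foldl_cons]
    split
    · rename_i hc
      refine ih _ (le_min hb ?_)
      have := hinv j
      have hd : 0 ≤ ((i : Int) - (j : Int)) * ((i : Int) - (j : Int)) := mul_self_nonneg _
      rcases this with h | h
      · exact absurd h hc.2
      · omega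
    · exact ih b hb

-- a min-fold over costs all ≥ the accumulator is constant
theorem foldMin_const (tbl : List Int) (i : Nat) (L : List Nat) (b : Int)
    (h : ∀ j ∈ L, b ≤ tbl.getD j 0 + ((i : Int) - (j : Int)) * ((i : Int) - (j : Int))) :
    (L.foldl (fun m j =>
      min m (tbl.getD j 0 + ((i : Int) - (j : Int)) * ((i : Int) - (j : Int)))) b) = b := by
  induction L with
  | nil => rfl
  | cons j js ih =>
    simp only [List.foldl_cons]
    have hb : min b (tbl.getD j 0 + ((i : Int) - (j : Int)) * ((i : Int) - (j : Int))) = b := by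
      have := h j (by simp); omega
    rw [hb]
    exact ih (fun j hj => h j (by simp [hj]))

-- core: the descending scan with break equals a plain min-fold over the same list
theorem bScanB_eq_fold (tbl : List Int) (i : Nat) (hinv : pvInv tbl)
    (L : List Nat) (b : Int)
    (hlt : ∀ j ∈ L, j < i) (hsort : L.Pairwise (· > ·))
    (hval : ∀ j ∈ L, tbl.getD j 0 ≠ -1) :
    bScanB tbl i L b =
    L.foldl (fun m j =>
      min m (tbl.getD j 0 + ((i : Int) - (j : Int)) * ((i : Int) - (j : Int)))) b := by
  induction L generalizing b with
  | nil => rfl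
  | cons j js ih =>
    have hji : j < i := hlt j (by simp)
    have hd1 : (1 : Int) ≤ (i : Int) - (j : Int) := by
      have : (j : Int) < (i : Int) := by exact_mod_cast hji
      omega
    simp only [bScanB, List.foldl_cons]
    by_cases hbr : b ≤ ((i : Int) - (j : Int)) * ((i : Int) - (j : Int))
    · rw [if_pos hbr]
      refine (foldMin_const tbl i (j :: js) b ?_).symm
      intro j' hj'
      have hj'j : j' ≤ j := by
        rcases hj' with _ | hj'
        · exact le_refl _
        · exact le_of_lt (List.rel_of_pairwise_cons hsort (by assumption))
      have hdj : (i : Int) - (j : Int) ≤ (i : Int) - (j' : Int) := by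
        have : (j' : Int) ≤ (j : Int) := by exact_mod_cast hj'j
        omega
      have hsq : ((i : Int) - (j : Int)) * ((i : Int) - (j : Int)) ≤
          ((i : Int) - (j' : Int)) * ((i : Int) - (j' : Int)) :=
        mul_le_mul hdj hdj (by omega) (by omega)
      rcases hinv j' with ht | ht
      · exact absurd ht (hval j' hj')
      · omega
    · rw [if_neg hbr]
      have hstep :
          (if tbl.getD j 0 + ((i : Int) - (j : Int)) * ((i : Int) - (j : Int)) < b
            then tbl.getD j 0 + ((i : Int) - (j : Int)) * ((i : Int) - (j : Int)) else b) =
          min b (tbl.getD j 0 + ((i : Int) - (j : Int)) * ((i : Int) - (j : Int))) := by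
        split_ifs <;> omega
      rw [hstep]
      exact ih _ (fun j' hj' => hlt j' (by simp [hj']))
        (List.Pairwise.of_cons hsort) (fun j' hj' => hval j' (by simp [hj']))

-- a fold by a right-commutative step is invariant under reversing the list
theorem pvFoldl_out {α β : Type} (f : β → α → β)
    (hcomm : ∀ m a c, f (f m a) c = f (f m c) a) :
    ∀ (L : List α) (b : β) (a : α), f (L.foldl f b) a = L.foldl f (f b a) := by
  intro L
  induction L with
  | nil => intro b a; rfl
  | cons h t ih =>
    intro b a
    simp only [List.foldl_cons]
    rw [ih (f b h) a, hcomm]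

theorem pvFoldl_reverse {α β : Type} (f : β → α → β)
    (hcomm : ∀ m a c, f (f m a) c = f (f m c) a) :
    ∀ (L : List α) (b : β), L.reverse.foldl f b = L.foldl f b := by
  intro L
  induction L with
  | nil => intro b; rfl
  | cons h t ih =>
    intro b
    simp only [List.reverse_cons, List.foldl_append, List.foldl_cons, List.foldl_nil]
    rw [ih b, pvFoldl_out f hcomm]

-- B reads data through temp[:n]; below index N the entries agree with A's data
theorem pvData_take (l : List Char) (N j : Nat) (hj : j < N) :
    ((l.take N).map pvCodeB).getD j 0 = (l.map pvCode).getD j 0 := by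
  have h : pvCodeB = pvCode := by funext c; rfl
  simp [List.getD_eq_getElem?_getD, hj, h]

-- B's data values (and the getD default) are always 0, 1 or 2
theorem pvData_vals (l : List Char) (N j : Nat) :
    ((l.take N).map pvCodeB).getD j 0 = 0 ∨ ((l.take N).map pvCodeB).getD j 0 = 1 ∨
    ((l.take N).map pvCodeB).getD j 0 = 2 := by
  rw [List.getD_eq_getElem?_getD]
  rcases h : ((l.take N).map pvCodeB)[j]? with _ | v
  · left; rfl
  · rw [List.getElem?_map] at h
    rcases h' : (l.take N)[j]? with _ | c
    · rw [h'] at h; simp at h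
    · rw [h'] at h
      simp only [Option.map_some, Option.some.injEq] at h
      subst h
      unfold pvCodeB
      split_ifs <;> simp

-- the bucket predicate: j is a usable predecessor of color c
def pvP (data tbl : List Int) (c : Int) : Nat → Bool :=
  fun j => decide (data.getD j 0 = c ∧ tbl.getD j 0 ≠ -1)

-- bucket invariant after the first k iterations
def pvBInv (data tbl : List Int) (k : Nat) (bs : List Nat × List Nat × List Nat) : Prop :=
  bs.1 = (List.range k).filter (pvP data tbl 0) ∧
  bs.2.1 = (List.range k).filter (pvP data tbl 1) ∧
  bs.2.2 = (List.range k).filter (pvP data tbl 2)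

-- the combined induction: equal tables, table invariant, table length, buckets
theorem pvMain (dataA dataB : List Int) (N : Nat)
    (hdata : ∀ j, j < N → dataB.getD j 0 = dataA.getD j 0)
    (hvals : ∀ j, dataB.getD j 0 = 0 ∨ dataB.getD j 0 = 1 ∨ dataB.getD j 0 = 2) :
    ∀ k, k < N →
      (let TA := (List.range' 1 k).foldl (fun tbl i =>
          tbl ++ [if solAInner dataA tbl i = 10 ^ 9 then -1 else solAInner dataA tbl i]) [0]
       let TB := (List.range' 1 k).foldl
          (fun (st : List Int × (List Nat × List Nat × List Nat)) i =>
            let tbl := st.1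
            let bs := if tbl.getD (i - 1) 0 ≠ -1
              then pvBAdd st.2 (dataB.getD (i - 1) 0) (i - 1) else st.2
            let need := PySem.Int.mod (dataB.getD i 0 - 1) 3
            let best := bScanB tbl i (pvBGet bs need).reverse (10 ^ 9)
            (tbl ++ [if best < 10 ^ 9 then best else -1], bs)) ([0], ([], [], []))
       TA = TB.1 ∧ pvInv TA ∧ TA.length = k + 1 ∧ pvBInv dataB TA k TB.2) := by
  intro k
  induction k with
  | zero =>
    intro _
    refine ⟨rfl, ?_, rfl, by constructor <;> simp⟩
    intro j
    cases j with
    | zero => right; rfl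
    | succ j => right; rfl
  | succ k ih =>
    intro hk
    obtain ⟨heq, hinv, hlen, hbinv⟩ := ih (Nat.lt_of_succ_lt hk)
    simp only at heq hinv hlen hbinv ⊢
    have hconc : List.range' 1 (k + 1) = List.range' 1 k ++ [1 + k] := by
      simpa using List.range'_concat (s := 1) (n := k) (step := 1)
    rw [hconc, List.foldl_append, List.foldl_append]
    simp only [List.foldl_cons, List.foldl_nil]
    rw [← heq]
    set t := (List.range' 1 k).foldl (fun tbl i =>
        tbl ++ [if solAInner dataA tbl i = 10 ^ 9 then -1 else solAInner dataA tbl i]) [0]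
      with ht
    set bs := ((List.range' 1 k).foldl
          (fun (st : List Int × (List Nat × List Nat × List Nat)) i =>
            let tbl := st.1
            let bs := if tbl.getD (i - 1) 0 ≠ -1
              then pvBAdd st.2 (dataB.getD (i - 1) 0) (i - 1) else st.2
            let need := PySem.Int.mod (dataB.getD i 0 - 1) 3
            let best := bScanB tbl i (pvBGet bs need).reverse (10 ^ 9)
            (tbl ++ [if best < 10 ^ 9 then best else -1], bs)) ([0], ([], [], []))).2
      with hbs
    set i := 1 + k with hi
    have hiN : i < N := by omega
    have hj0 : i - 1 = k := by omega
    -- the updated buckets satisfy the invariant for range (k+1)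
    have hrs : List.range (k + 1) = List.range k ++ [k] := List.range_succ
    have hbinv' : pvBInv dataB t (k + 1)
        (if t.getD (i - 1) 0 ≠ -1 then pvBAdd bs (dataB.getD (i - 1) 0) (i - 1) else bs) := by
      rw [hj0]
      obtain ⟨hb0, hb1, hb2⟩ := hbinv
      by_cases hm1 : t.getD k 0 = -1
      · rw [if_neg (by simpa using hm1)]
        have hm1' : t[k]?.getD 0 = (-1 : Int) := by
          simpa [List.getD_eq_getElem?_getD] using hm1
        have hf : ∀ c : Int, (List.range (k + 1)).filter (pvP dataB t c) =
            (List.range k).filter (pvP dataB t c) := by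
          intro c
          rw [hrs, List.filter_append]
          simp [pvP, List.getD_eq_getElem?_getD, hm1']
        exact ⟨by rw [hf 0, ← hb0], by rw [hf 1, ← hb1], by rw [hf 2, ← hb2]⟩
      · rw [if_pos (by simpa using hm1)]
        have hm1' : ¬ t[k]?.getD 0 = (-1 : Int) := by
          simpa [List.getD_eq_getElem?_getD] using hm1
        have hfilt : ∀ c : Int, (List.range (k + 1)).filter (pvP dataB t c) =
            (List.range k).filter (pvP dataB t c) ++
              (if dataB.getD k 0 = c then [k] else []) := by
          intro c
          rw [hrs, List.filter_append]
          by_cases hc : dataB.getD k 0 = c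
          · have hc' : dataB[k]?.getD 0 = c := by
              simpa [List.getD_eq_getElem?_getD] using hc
            simp [pvP, List.getD_eq_getElem?_getD, hc', hm1']
          · have hc' : ¬ dataB[k]?.getD 0 = c := by
              simpa [List.getD_eq_getElem?_getD] using hc
            simp [pvP, List.getD_eq_getElem?_getD, hc']
        have hcase : ∀ v : Int, dataB.getD k 0 = v → dataB[k]?.getD 0 = v :=
          fun v hv => by simpa [List.getD_eq_getElem?_getD] using hv
        rcases hvals k with hv | hv | hv <;>
          have hv' := hcase _ hv <;>
          simp only [pvBAdd, hv, pvBInv] <;>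
          refine ⟨?_, ?_, ?_⟩ <;>
          simp [hfilt, hv', hb0, hb1, hb2]
    set bs' := if t.getD (i - 1) 0 ≠ -1 then pvBAdd bs (dataB.getD (i - 1) 0) (i - 1) else bs
      with hbs'
    -- B's need is a color 0, 1 or 2, and its bucket is the filtered range
    have hneed : PySem.Int.mod (dataB.getD i 0 - 1) 3 = 0 ∨
        PySem.Int.mod (dataB.getD i 0 - 1) 3 = 1 ∨
        PySem.Int.mod (dataB.getD i 0 - 1) 3 = 2 := by
      rcases hvals i with hv | hv | hv <;> rw [hv] <;> decide
    have hbucket : pvBGet bs' (PySem.Int.mod (dataB.getD i 0 - 1) 3) =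
        (List.range (k + 1)).filter (pvP dataB t (PySem.Int.mod (dataB.getD i 0 - 1) 3)) := by
      obtain ⟨hb0, hb1, hb2⟩ := hbinv'
      rcases hneed with hv | hv | hv <;> rw [hv] <;> simp [pvBGet, hb0, hb1, hb2]
    -- B's scan equals A's inner minimum
    have hscan : bScanB t i
        (pvBGet bs' (PySem.Int.mod (dataB.getD i 0 - 1) 3)).reverse (10 ^ 9) =
        solAInner dataA t i := by
      have hri : List.range i = List.range (k + 1) := by rw [hi, Nat.add_comm]
      rw [hbucket]
      set L := (List.range (k + 1)).filter (pvP dataB t (PySem.Int.mod (dataB.getD i 0 - 1) 3))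
        with hL
      have h1 : bScanB t i L.reverse (10 ^ 9) = L.reverse.foldl (fun m j =>
          min m (t.getD j 0 + ((i : Int) - (j : Int)) * ((i : Int) - (j : Int)))) (10 ^ 9) := by
        refine bScanB_eq_fold t i hinv L.reverse _ ?_ ?_ ?_
        · intro j hj
          have := List.mem_range.1 (List.mem_of_mem_filter (List.mem_reverse.1 hj))
          omega
        · rw [List.pairwise_reverse]
          exact List.Pairwise.filter _ (by simpa using List.pairwise_lt_range)
        · intro j hj
          have := List.of_mem_filter (List.mem_reverse.1 hj)
          simp only [pvP, decide_eq_true_eq] at this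
          exact this.2
      have h2 : L.reverse.foldl (fun m j =>
          min m (t.getD j 0 + ((i : Int) - (j : Int)) * ((i : Int) - (j : Int)))) (10 ^ 9) =
          L.foldl (fun m j =>
          min m (t.getD j 0 + ((i : Int) - (j : Int)) * ((i : Int) - (j : Int)))) (10 ^ 9) := by
        refine pvFoldl_reverse _ ?_ L _
        intro m a c
        dsimp only
        omega
      have h3 : L.foldl (fun m j =>
          min m (t.getD j 0 + ((i : Int) - (j : Int)) * ((i : Int) - (j : Int)))) (10 ^ 9) =
          (List.range (k + 1)).foldl (fun m j =>
            if pvP dataB t (PySem.Int.mod (dataB.getD i 0 - 1) 3) j then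
              min m (t.getD j 0 + ((i : Int) - (j : Int)) * ((i : Int) - (j : Int)))
            else m) (10 ^ 9) := by
        rw [hL]
        exact List.foldl_filter
      have h4 : (List.range (k + 1)).foldl (fun m j =>
            if pvP dataB t (PySem.Int.mod (dataB.getD i 0 - 1) 3) j then
              min m (t.getD j 0 + ((i : Int) - (j : Int)) * ((i : Int) - (j : Int)))
            else m) (10 ^ 9) = solAInner dataA t i := by
        unfold solAInner
        rw [hri]
        refine PySem.List.foldl_congr_mem (l := List.range (k + 1)) _ _ _ ?_
        intro acc x hx
        have hxk : x < k + 1 := List.mem_range.1 hx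
        simp only [pvP, decide_eq_true_eq]
        rw [hdata x (by omega), hdata i hiN]
      rw [h1, h2, h3, h4]
    rw [hscan]
    have hle : solAInner dataA t i ≤ 10 ^ 9 := foldA_le dataA t i _ _
    have hval : (if solAInner dataA t i = 10 ^ 9 then (-1 : Int) else solAInner dataA t i)
        = (if solAInner dataA t i < 10 ^ 9 then solAInner dataA t i else -1) := by
      split_ifs <;> omega
    set v := if solAInner dataA t i = 10 ^ 9 then (-1 : Int) else solAInner dataA t i with hv
    have hvok : v = -1 ∨ 0 ≤ v := by
      rw [hv]; split_ifs with h
      · left; rfl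
      · right; exact foldA_nonneg dataA t i hinv _ _ (by norm_num)
    refine ⟨by rw [hval], pvInv_append t v hinv hvok, by simp [hlen], ?_⟩
    -- bucket invariant carries over to the appended table (entries below k+1 unchanged)
    obtain ⟨hb0, hb1, hb2⟩ := hbinv'
    have hfc : ∀ c : Int, (List.range (k + 1)).filter (pvP dataB (t ++ [v]) c) =
        (List.range (k + 1)).filter (pvP dataB t c) := by
      intro c
      refine List.filter_congr ?_
      intro x hx
      have hxk : x < k + 1 := List.mem_range.1 hx
      simp only [pvP]
      rw [pvGetD_append_left t v x (by omega)]
    exact ⟨by rw [hfc 0, ← hb0], by rw [hfc 1, ← hb1], by rw [hfc 2, ← hb2]⟩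

-- ===== VERDICT (by name: the statement is the Claim_ definition above) =====
theorem solution_spec : Claim_equal_solution := by
  intro n temp _ _
  unfold Spec_solution solution solution_alt
  simp only
  by_cases hN : n.toNat = 0
  · simp [hN]
  · have hmain := pvMain (temp.toList.map pvCode) ((temp.toList.take n.toNat).map pvCodeB)
      n.toNat (fun j hj => pvData_take temp.toList n.toNat j hj)
      (fun j => pvData_vals temp.toList n.toNat j) (n.toNat - 1) (by omega)
    simp only at hmain
    rw [hmain.1]
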